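-- pv_equiv track=rewrite | github.com/Evilnames/Collector | sculpture.py | _make_temple_gate_grid
-- ===== SOURCE A (Python) =====
-- def _empty(h):
--     return [[False] * 8 for _ in range(h * 4)]
--
-- def _make_temple_gate_grid(height):
--     """Paifang memorial gate: two pillars, sweeping roof, crossbeam below."""
--     rows = height * 4
--     g    = _empty(height)
--     for r in range(rows):
--         g[r][0] = g[r][1] = g[r][6] = g[r][7] = True
--     roof_h = max(3, rows // 3)
--     # Ridge: solid top
--     for r in range(min(2, roof_h)):
--         g[r] = [True] * 8
--     # Upswept eave wings
--     if roof_h > 2: g[2] = [True, True, False, False, False, False, True, True]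
--     if roof_h > 3: g[3] = [True, False, False, False, False, False, False, True]
--     # Lintel below roof
--     lr = roof_h
--     if lr < rows:     g[lr] = [True] * 8
--     if lr + 1 < rows: g[lr + 1] = [True] * 8
--     return g
-- ===== SOURCE B (Python) =====
-- def _make_temple_gate_grid(height):
--     """Paifang memorial gate built row-by-row: each row is decided once."""
--     rows = height * 4
--     roof_h = max(3, rows // 3)
--     lr = roof_h
--
--     def row(r):
--         if r == lr or r == lr + 1:          # lintel (wins over the eave when lr == 3)
--             return [True] * 8
--         if r < 2:                           # solid ridge
--             return [True] * 8
--         if r == 3 and roof_h > 3:           # upswept eave wing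
--             return [True, False, False, False, False, False, False, True]
--         return [True, True, False, False, False, False, True, True]  # pillars (also r == 2)
--
--     return [row(r) for r in range(rows)]
-- ===== Notes on version B (the rewrite author's own statement) =====
-- stated objective: simpler
-- what changed: B decides every row once in a single comprehension (lintel > ridge > eave > pillar priority) instead of allocating a blank grid and overwriting it in five mutation passes.
-- crash fix: For height <= 0 A raises IndexError (the grid is empty but the eave write g[2] is unconditional since roof_h is always >= 3); B naturally returns the empty grid [] there. — e.g. on _make_temple_gate_grid(0): A raises IndexError, B returns []
import Mathlib
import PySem

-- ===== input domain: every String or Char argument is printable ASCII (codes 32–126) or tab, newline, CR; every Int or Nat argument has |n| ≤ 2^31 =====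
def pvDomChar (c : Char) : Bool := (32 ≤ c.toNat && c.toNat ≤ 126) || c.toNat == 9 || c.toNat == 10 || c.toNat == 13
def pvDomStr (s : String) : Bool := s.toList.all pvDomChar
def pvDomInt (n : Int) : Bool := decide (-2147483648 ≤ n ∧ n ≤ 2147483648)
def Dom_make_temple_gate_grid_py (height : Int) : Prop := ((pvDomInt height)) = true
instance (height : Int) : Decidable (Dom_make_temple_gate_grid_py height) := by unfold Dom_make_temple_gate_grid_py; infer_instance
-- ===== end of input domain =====

-- B builds each row once in a single pass instead of A's blank-grid-plus-five-overwrite-passes (objective: simpler).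
-- ===== PORT A =====
-- _empty(h): [[False]*8 for _ in range(h*4)]
def pvEmpty (h : Int) : List (List Bool) :=
  (PySem.List.pyRange 0 (h * 4) 1).map (fun _ => List.replicate 8 false)

def make_temple_gate_grid_py (height : Int) : List (List Bool) :=
  let rows := height * 4
  let g0 := pvEmpty height
  -- for r in range(rows): g[r][0] = g[r][1] = g[r][6] = g[r][7] = True
  let g1 := (PySem.List.pyRange 0 rows 1).foldl
      (fun g r => g.modify r.toNat
        (fun row => (((row.set 0 true).set 1 true).set 6 true).set 7 true)) g0
  let roof_h := max 3 (PySem.Int.floordiv rows 3)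
  -- for r in range(min(2, roof_h)): g[r] = [True]*8
  let g2 := (PySem.List.pyRange 0 (min 2 roof_h) 1).foldl
      (fun g r => g.set r.toNat (List.replicate 8 true)) g1
  let g3 := if roof_h > 2 then g2.set 2 [true, true, false, false, false, false, true, true] else g2
  let g4 := if roof_h > 3 then g3.set 3 [true, false, false, false, false, false, false, true] else g3
  let lr := roof_h
  let g5 := if lr < rows then g4.set lr.toNat (List.replicate 8 true) else g4
  let g6 := if lr + 1 < rows then g5.set (lr + 1).toNat (List.replicate 8 true) else g5
  g6

-- ===== PORT B =====
def pvRow (roof_h lr r : Int) : List Bool :=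
  if r = lr ∨ r = lr + 1 then List.replicate 8 true
  else if r < 2 then List.replicate 8 true
  else if r = 3 ∧ roof_h > 3 then [true, false, false, false, false, false, false, true]
  else [true, true, false, false, false, false, true, true]

def make_temple_gate_grid_py_alt (height : Int) : List (List Bool) :=
  let rows := height * 4
  let roof_h := max 3 (PySem.Int.floordiv rows 3)
  let lr := roof_h
  (PySem.List.pyRange 0 rows 1).map (pvRow roof_h lr)

-- ===== PRECONDITION & SPEC =====
-- Pre_: height ≥ 1; for height ≤ 0 the grid is empty and A's unconditional eave write g[2] raises IndexError.
def Pre_make_temple_gate_grid_py (height : Int) : Prop := 1 ≤ height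
instance (height : Int) : Decidable (Pre_make_temple_gate_grid_py height) := by unfold Pre_make_temple_gate_grid_py; infer_instance
def pvWitness_make_temple_gate_grid_py : Int := 2

-- For height ≤ 0 A raises IndexError (empty grid, but roof_h ≥ 3 so 'g[2] = …' always runs); B returns [].
def Raises_make_temple_gate_grid_py (height : Int) : Prop := height ≤ 0
instance (height : Int) : Decidable (Raises_make_temple_gate_grid_py height) := by unfold Raises_make_temple_gate_grid_py; infer_instance
def pvRaiseWitness_make_temple_gate_grid_py : Int := 0
def pvRaiseWitnessOut_make_temple_gate_grid_py : List (List Bool) := []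

def Spec_make_temple_gate_grid_py (height : Int) (out : List (List Bool)) : Prop := out = make_temple_gate_grid_py_alt height
instance (height : Int) (out : List (List Bool)) : Decidable (Spec_make_temple_gate_grid_py height out) := by unfold Spec_make_temple_gate_grid_py; infer_instance

-- ===== CLAIM (what is proved, stated in full; the proofs are below) =====
def Claim_equal_make_temple_gate_grid_py : Prop := ∀ (height : Int), Dom_make_temple_gate_grid_py height → Pre_make_temple_gate_grid_py height → Spec_make_temple_gate_grid_py height (make_temple_gate_grid_py height)
def Claim_raises_make_temple_gate_grid_py : Prop := (∀ (height : Int), Dom_make_temple_gate_grid_py height → Raises_make_temple_gate_grid_py height → ¬ Pre_make_temple_gate_grid_py height) ∧ (Dom_make_temple_gate_grid_py (pvRaiseWitness_make_temple_gate_grid_py) ∧ Raises_make_temple_gate_grid_py (pvRaiseWitness_make_temple_gate_grid_py) ∧ make_temple_gate_grid_py_alt (pvRaiseWitness_make_temple_gate_grid_py) = pvRaiseWitnessOut_make_temple_gate_grid_py)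

-- ===== LEMMAS AND PROOFS =====

lemma fold_modify_length {α : Type} (f : α → α) (l : List Int) (g : List α) :
    (l.foldl (fun acc r => acc.modify r.toNat f) g).length = g.length := by
  induction l generalizing g with
  | nil => rfl
  | cons x xs ih => simpa [List.foldl] using (ih (g.modify x.toNat f)).trans (List.length_modify ..)

lemma fold_modify_get {α : Type} (f : α → α) (m : Nat) (g : List α) (j : Nat) :
    ((PySem.List.pyRange 0 (m : Int) 1).foldl (fun acc r => acc.modify r.toNat f) g)[j]?
      = if j < m then f <$> g[j]? else g[j]? := by
  induction m with
  | zero => simp [PySem.List.pyRange_one_eq_nil le_rfl]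
  | succ m ih =>
    have h1 : ((m : Int) + 1) = ((m + 1 : Nat) : Int) := by push_cast; ring
    rw [← h1, PySem.List.pyRange_one_succ_right (by positivity), List.foldl_append]
    simp only [List.foldl]
    rw [List.getElem?_modify, ih]
    rcases Nat.lt_trichotomy j m with h | h | h
    · simp [h, Nat.lt_succ_of_lt h, Int.toNat_natCast, Nat.ne_of_gt h]
    · subst h
      simp [Int.toNat_natCast]
    · have : ¬ j < m := by omega
      have : ¬ j < m + 1 := by omega
      simp [Int.toNat_natCast, Nat.ne_of_lt h, *]


-- ===== VERDICT (by name: the statement is the Claim_ definition above) =====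
set_option maxHeartbeats 1600000 in
theorem make_temple_gate_grid_py_spec : Claim_equal_make_temple_gate_grid_py := by
  unfold Claim_equal_make_temple_gate_grid_py
  intro height hdom hpre
  unfold Pre_make_temple_gate_grid_py at hpre
  unfold Spec_make_temple_gate_grid_py
  simp only [make_temple_gate_grid_py, make_temple_gate_grid_py_alt, pvEmpty]
  set rows : Int := height * 4 with hrows
  have hrows4 : 4 ≤ rows := by omega
  have hfd : PySem.Int.floordiv rows 3 = rows / 3 :=
    PySem.Int.floordiv_eq_ediv_of_pos (by omega)
  set fd : Int := PySem.Int.floordiv rows 3 with hfddef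
  have hfd2 : fd = rows / 3 := hfd
  set lr : Int := max 3 fd with hlr
  have hlr3 : 3 ≤ lr := by omega
  have hlrlt : lr < rows := by omega
  have hmin : min 2 (max 3 fd) = 2 := by omega
  rw [hmin]
  have hrange2 : PySem.List.pyRange 0 2 1 = [0, 1] := by decide
  rw [hrange2]
  simp only [List.foldl]
  set R : Nat := rows.toNat with hR
  have hRcast : rows = (R : Int) := by omega
  rw [hRcast]
  have hlen : (((PySem.List.pyRange 0 (R:Int) 1).foldl
      (fun g r => g.modify r.toNat
        (fun row => (((row.set 0 true).set 1 true).set 6 true).set 7 true))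
      ((PySem.List.pyRange 0 (R:Int) 1).map fun _ => List.replicate 8 false)).length) = R := by
    rw [fold_modify_length]; simp [PySem.List.length_pyRange_one]
  clear_value rows fd lr R
  split_ifs with h1 h2 h3 h4 <;> try omega
  all_goals (
    apply List.ext_getElem?
    intro j
    by_cases hj : j < R
    · rw [PySem.List.getElem?_map_pyRange_zero _ _ _ hj]
      simp only [List.getElem?_set, List.length_set, hlen, fold_modify_get, if_pos hj,
        PySem.List.getElem?_map_pyRange_zero _ _ _ hj]
      unfold pvRow
      split_ifs <;> first | rfl | omega
    · have hrhs : (List.map (pvRow lr lr) (PySem.List.pyRange 0 (R:Int) 1))[j]? = none := by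
        apply List.getElem?_eq_none
        simp [PySem.List.length_pyRange_one]; omega
      rw [hrhs]
      have hg0 : ((PySem.List.pyRange 0 (R:Int) 1).map (fun _ => List.replicate 8 false))[j]? = (none : Option (List Bool)) := by
        apply List.getElem?_eq_none
        simp [PySem.List.length_pyRange_one]; omega
      simp only [List.getElem?_set, List.length_set, hlen, fold_modify_get, if_neg hj, hg0]
      split_ifs <;> first | rfl | omega)

def make_temple_gate_grid_py_raises : Claim_raises_make_temple_gate_grid_py := by
  unfold Claim_raises_make_temple_gate_grid_py
  exact ⟨fun h _ hr => by unfold Raises_make_temple_gate_grid_py at hr; unfold Pre_make_temple_gate_grid_py; omega, by decide⟩
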